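-- pv_equiv track=rewrite | github.com/chenye95/LeetCode_Progress | FB_2_RotaryLock.py | get_min_code_entry_time
-- ===== SOURCE A (Python) =====
-- from typing import List, Dict, Tuple
--
-- def turn_digit_time(N: int, current_position: int, next_position: int) -> int:
--     return min(abs(next_position - current_position), N - abs(next_position - current_position))
--     """
--     # alternatively can use this if branching
--     if next_position > current_position:
--         return min(next_position - current_position, current_position + N - next_position)
--     else:
--         return min(current_position - next_position, next_position + N - current_position)
--     """
--
-- def get_min_code_entry_time(N: int, M: int, C: List[int]) -> int:
--     last_step_time: Dict[Tuple[int, int], int] = {(1, 1): 0}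
--
--     for next_position in C:
--         current_step_time = {}
--         for current_combo, current_time in last_step_time.items():
--             current_position = current_combo[0]
--             next_time = current_time + turn_digit_time(N, current_position, next_position)
--             proposed_combo = (next_position, current_combo[1])
--             if proposed_combo not in current_step_time:
--                 current_step_time[proposed_combo] = next_time
--             else:
--                 current_step_time[proposed_combo] = min(next_time, current_step_time[proposed_combo])
--
--             current_position = current_combo[1]
--             next_time = current_time + turn_digit_time(N, current_position, next_position)
--             proposed_combo = (current_combo[0], next_position)
--             if proposed_combo not in current_step_time:
--                 current_step_time[proposed_combo] = next_time
--             else: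
--                 current_step_time[proposed_combo] = min(next_time, current_step_time[proposed_combo])
--
--         last_step_time = current_step_time
--
--     return min(value for value in last_step_time.values())
-- ===== SOURCE B (Python) =====
-- def get_min_code_entry_time(N, M, C):
--     def cost(a, b):
--         d = abs(b - a)
--         return min(d, N - d)
--     # Backward DP over lists: idles[j] is the idle wheel's position entering step j
--     # (1 initially, else the previous target); dp[j] = best time for the suffix.
--     idles = [1] + C
--     n = len(C)
--     dp = [0] * (n + 1)
--     for i in range(n - 1, -1, -1):
--         t, prev = C[i], idles[i]
--         dp = [min(cost(prev, t) + dp[j], cost(idles[j], t) + dp[i])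
--               for j in range(i + 1)]
--     return dp[0]
-- ===== Notes on version B (the rewrite author's own statement) =====
-- stated objective: alternative
-- what changed: Replaces the forward DP over a dict of (wheel1,wheel2) pair-states with a backward list DP indexed by the single idle-wheel position (idles[j] = jth possible idle position), exploiting that the turning cost is wheel-agnostic.
import Mathlib
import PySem

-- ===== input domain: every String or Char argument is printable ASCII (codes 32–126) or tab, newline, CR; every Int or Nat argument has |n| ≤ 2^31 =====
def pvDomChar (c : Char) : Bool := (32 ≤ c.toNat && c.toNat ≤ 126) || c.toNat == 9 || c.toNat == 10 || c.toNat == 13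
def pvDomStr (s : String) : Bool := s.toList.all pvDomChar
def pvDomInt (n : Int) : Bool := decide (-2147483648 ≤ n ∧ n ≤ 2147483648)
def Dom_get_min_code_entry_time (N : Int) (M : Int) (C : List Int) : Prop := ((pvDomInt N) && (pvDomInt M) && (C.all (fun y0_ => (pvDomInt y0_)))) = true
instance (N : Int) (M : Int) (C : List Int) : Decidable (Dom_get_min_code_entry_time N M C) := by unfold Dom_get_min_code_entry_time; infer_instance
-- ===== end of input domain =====

-- B replaces A's forward DP over a dict of (wheel1, wheel2) pair-states by a backward
-- list DP indexed by the idle wheel's position only (the cost is wheel-agnostic).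

-- ===== PORT A =====

-- helper turn_digit_time
def turn_digit_time (N current_position next_position : Int) : Int :=
  min |next_position - current_position| (N - |next_position - current_position|)

-- inner loop body of A: the two insert-or-min updates for one dict entry
def pvStepEntry (N next_position : Int) (current_step_time : PySem.Dict (Int × Int) Int)
    (p : (Int × Int) × Int) : PySem.Dict (Int × Int) Int :=
  let current_combo := p.1
  let current_time := p.2
  let next_time := current_time + turn_digit_time N current_combo.1 next_position
  let proposed_combo := (next_position, current_combo.2)
  let current_step_time :=
    if current_step_time.contains proposed_combo = false then
      current_step_time.insert proposed_combo next_time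
    else
      current_step_time.insert proposed_combo (min next_time (current_step_time.getD proposed_combo 0))
  let next_time2 := current_time + turn_digit_time N current_combo.2 next_position
  let proposed_combo2 := (current_combo.1, next_position)
  if current_step_time.contains proposed_combo2 = false then
    current_step_time.insert proposed_combo2 next_time2
  else
    current_step_time.insert proposed_combo2 (min next_time2 (current_step_time.getD proposed_combo2 0))

-- outer loop body of A: one target digit
def pvStepTarget (N : Int) (last_step_time : PySem.Dict (Int × Int) Int) (next_position : Int) :
    PySem.Dict (Int × Int) Int :=
  last_step_time.items.foldl (pvStepEntry N next_position) PySem.Dict.empty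

def get_min_code_entry_time (N : Int) (M : Int) (C : List Int) : Int :=
  let last_step_time : PySem.Dict (Int × Int) Int := (PySem.Dict.empty).insert (1, 1) 0
  let last_step_time := C.foldl (pvStepTarget N) last_step_time
  -- the dict is provably never empty, so Python's min over its values always returns
  (PySem.List.min? last_step_time.values (fun value => value)).getD 0

-- ===== PORT B =====

-- helper cost of Source B
def pvCostB (N a b : Int) : Int :=
  let d := |b - a|
  min d (N - d)

-- loop body of Source B: one backward step i, rebuilding dp by a comprehension
def pvStepB (N : Int) (C idles : List Int) (dp : List Int) (i : Int) : List Int :=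
  let t := PySem.List.pyGetD C i 0
  let prev := PySem.List.pyGetD idles i 0
  (PySem.List.pyRange 0 (i + 1) 1).map (fun j =>
    min (pvCostB N prev t + PySem.List.pyGetD dp j 0)
        (pvCostB N (PySem.List.pyGetD idles j 0) t + PySem.List.pyGetD dp i 0))

def get_min_code_entry_time_alt (N : Int) (M : Int) (C : List Int) : Int :=
  let idles := 1 :: C
  let n := C.length
  let dp := List.replicate (n + 1) (0 : Int)
  let dp := (PySem.List.pyRange ((n : Int) - 1) (-1) (-1)).foldl (pvStepB N C idles) dp
  PySem.List.pyGetD dp 0 0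

-- ===== PRECONDITION & SPEC =====
def Spec_get_min_code_entry_time (N : Int) (M : Int) (C : List Int) (out : Int) : Prop := out = get_min_code_entry_time_alt N M C
instance (N : Int) (M : Int) (C : List Int) (out : Int) : Decidable (Spec_get_min_code_entry_time N M C out) := by unfold Spec_get_min_code_entry_time; infer_instance

-- ===== CLAIM (what is proved, stated in full; the proofs are below) =====
def Claim_equal_get_min_code_entry_time : Prop := ∀ (N : Int) (M : Int) (C : List Int), Dom_get_min_code_entry_time N M C → Spec_get_min_code_entry_time N M C (get_min_code_entry_time N M C)

-- ===== LEMMAS AND PROOFS =====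

-- the common mathematical value: gRec N code cur idle = min time to enter `code`
-- with the two wheels at positions cur and idle
def gRec (N : Int) : List Int → Int → Int → Int
  | [], _, _ => 0
  | t :: rest, cur, idle =>
      min (turn_digit_time N cur t + gRec N rest t idle)
          (turn_digit_time N idle t + gRec N rest t cur)

lemma gRec_comm (N : Int) (l : List Int) (a b : Int) : gRec N l a b = gRec N l b a := by
  cases l with
  | nil => rfl
  | cons t rest => simp [gRec, min_comm]

def wmin (h : Int × Int → Int) (l : List ((Int × Int) × Int)) : WithTop Int :=
  l.foldl (fun acc p => min acc ((p.2 + h p.1 : Int) : WithTop Int)) ⊤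

lemma foldl_min_init (h : Int × Int → Int) (l : List ((Int × Int) × Int)) :
    ∀ (a : WithTop Int), l.foldl (fun acc p => min acc ((p.2 + h p.1 : Int) : WithTop Int)) a = min a (wmin h l) := by
  induction l with
  | nil => intro a; simp [wmin]
  | cons x l ih =>
    intro a
    simp only [wmin, List.foldl_cons]
    rw [ih, ih (min ⊤ _)]
    simp [min_assoc]

lemma wmin_cons (h : Int × Int → Int) (p : (Int × Int) × Int) (l : List ((Int × Int) × Int)) :
    wmin h (p :: l) = min ((p.2 + h p.1 : Int) : WithTop Int) (wmin h l) := by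
  simp only [wmin, List.foldl_cons]
  rw [foldl_min_init]
  simp [wmin]

lemma wmin_append (h : Int × Int → Int) (l₁ l₂ : List ((Int × Int) × Int)) :
    wmin h (l₁ ++ l₂) = min (wmin h l₁) (wmin h l₂) := by
  simp only [wmin, List.foldl_append]
  rw [foldl_min_init]
  simp [wmin]

lemma wmin_replace (h : Int × Int → Int) (l : List ((Int × Int) × Int)) (k : Int × Int) (v v0 : Int)
    (hnd : (l.map (·.1)).Nodup) (hmem : (k, v0) ∈ l) :
    wmin h (l.map (fun p => if (p.1 == k) = true then (k, min v v0) else p)) =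
      min (wmin h l) ((v + h k : Int) : WithTop Int) := by
  induction l with
  | nil => simp at hmem
  | cons q l ih =>
    simp only [List.map_cons, List.nodup_cons, List.mem_map] at hnd
    by_cases hq : q.1 = k
    · have hknotl : ∀ p ∈ l, p.1 ≠ k := by
        intro p hp hpk
        exact hnd.1 ⟨p, hp, by rw [hpk, hq]⟩
      have hqv : q = (k, v0) := by
        rcases List.mem_cons.mp hmem with h1 | h1
        · exact h1.symm
        · exact absurd rfl (hknotl _ h1)
      have huntouched : l.map (fun p => if (p.1 == k) = true then (k, min v v0) else p) = l := by
        conv_rhs => rw [← List.map_id l]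
        apply List.map_congr_left
        intro p hp
        simp [hknotl p hp]
      subst hqv
      simp only [List.map_cons, beq_self_eq_true, if_pos, huntouched]
      rw [wmin_cons, wmin_cons]
      have : ((min v v0 + h k : Int) : WithTop Int) = min ((v0 + h k : Int) : WithTop Int) ((v + h k : Int) : WithTop Int) := by
        rw [← WithTop.coe_min]
        congr 1
        omega
      rw [this]
      simp [min_comm, min_left_comm]
    · have hmem' : (k, v0) ∈ l := by
        rcases List.mem_cons.mp hmem with h1 | h1
        · exact absurd (by rw [← h1]) hq
        · exact h1
      have := ih hnd.2 hmem'
      simp only [List.map_cons]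
      rw [if_neg (by simp [hq])]
      rw [wmin_cons, wmin_cons, this]
      simp [min_assoc]

lemma wmin_ins1 (h : Int × Int → Int) (d : PySem.Dict (Int × Int) Int) (k : Int × Int) (v : Int)
    (hnd : d.keys.Nodup) :
    wmin h ((if d.contains k = false then d.insert k v
             else d.insert k (min v (d.getD k 0))).items) =
      min (wmin h d.items) ((v + h k : Int) : WithTop Int) := by
  by_cases hc : d.contains k = false
  · rw [if_pos hc, PySem.Dict.items_insert_of_not_contains d v hc, wmin_append, wmin_cons]
    simp [wmin]
  · rw [if_neg hc]
    have hc' : d.contains k = true := by revert hc; cases d.contains k <;> simp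
    obtain ⟨v0, hv0⟩ : ∃ v0, d.get? k = some v0 := by
      have := PySem.Dict.contains_eq_isSome_get? (d := d) (k := k)
      rw [hc'] at this
      exact Option.isSome_iff_exists.mp this.symm
    have hgetD : d.getD k 0 = v0 := by
      rw [PySem.Dict.getD_eq_get?_getD, hv0]; rfl
    have hmem : (k, v0) ∈ d.items := PySem.Dict.mem_items_of_get?_eq_some d hv0
    rw [PySem.Dict.items_insert_of_contains d _ hc', hgetD]
    exact wmin_replace h d.items k v v0 (by simpa [PySem.Dict.keys] using hnd) hmem


lemma nodup_ins1 (d : PySem.Dict (Int × Int) Int) (k : Int × Int) (v : Int) (hnd : d.keys.Nodup) :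
    ((if d.contains k = false then d.insert k v
      else d.insert k (min v (d.getD k 0))).keys).Nodup := by
  split <;> exact PySem.Dict.nodup_keys_insert d k _ hnd

-- the two contributions of one old entry, as explicit pairs
def pvContribs (N t : Int) (l : List ((Int × Int) × Int)) : List ((Int × Int) × Int) :=
  l.flatMap (fun p =>
    [((t, p.1.2), p.2 + turn_digit_time N p.1.1 t),
     ((p.1.1, t), p.2 + turn_digit_time N p.1.2 t)])

lemma wmin_stepEntry (N t : Int) (h : Int × Int → Int) (d : PySem.Dict (Int × Int) Int)
    (p : (Int × Int) × Int) (hnd : d.keys.Nodup) :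
    wmin h (pvStepEntry N t d p).items =
      min (wmin h d.items) (wmin h (pvContribs N t [p])) ∧ (pvStepEntry N t d p).keys.Nodup := by
  unfold pvStepEntry
  simp only []
  constructor
  · rw [wmin_ins1 h _ _ _ (nodup_ins1 d _ _ hnd), wmin_ins1 h d _ _ hnd]
    simp only [pvContribs, List.flatMap_cons, List.flatMap_nil, List.append_nil, wmin_cons]
    simp [wmin, min_assoc]
  · exact nodup_ins1 _ _ _ (nodup_ins1 d _ _ hnd)

lemma wmin_foldl_stepEntry (N t : Int) (h : Int × Int → Int) (l : List ((Int × Int) × Int)) :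
    ∀ (d : PySem.Dict (Int × Int) Int), d.keys.Nodup →
      wmin h (l.foldl (pvStepEntry N t) d).items = min (wmin h d.items) (wmin h (pvContribs N t l)) := by
  induction l with
  | nil => intro d _; simp [pvContribs, wmin]
  | cons p l ih =>
    intro d hnd
    obtain ⟨h1, h2⟩ := wmin_stepEntry N t h d p hnd
    rw [List.foldl_cons, ih _ h2, h1]
    have : pvContribs N t (p :: l) = pvContribs N t [p] ++ pvContribs N t l := by
      simp [pvContribs]
    rw [this, wmin_append]
    simp [min_assoc]

lemma wmin_contribs (N t : Int) (rest : List Int) (l : List ((Int × Int) × Int)) :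
    wmin (fun k => gRec N rest k.1 k.2) (pvContribs N t l) =
      wmin (fun k => gRec N (t :: rest) k.1 k.2) l := by
  induction l with
  | nil => rfl
  | cons p l ih =>
    have hsplit : pvContribs N t (p :: l) = pvContribs N t [p] ++ pvContribs N t l := by
      simp [pvContribs]
    rw [hsplit, wmin_append, ih, wmin_cons]
    congr 1
    simp only [pvContribs, List.flatMap_cons, List.flatMap_nil, List.append_nil, wmin_cons]
    have hw : wmin (fun k => gRec N rest k.1 k.2) [] = ⊤ := rfl
    rw [hw, min_eq_left le_top]
    rw [← WithTop.coe_min]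
    congr 1
    have : gRec N rest p.1.1 t = gRec N rest t p.1.1 := gRec_comm N rest _ _
    simp only [gRec]
    rw [this]
    rw [add_assoc, add_assoc, min_add_add_left]

lemma wmin_stepTarget (N t : Int) (rest : List Int) (d : PySem.Dict (Int × Int) Int)
    (hnd : d.keys.Nodup) :
    wmin (fun k => gRec N rest k.1 k.2) (pvStepTarget N d t).items =
      wmin (fun k => gRec N (t :: rest) k.1 k.2) d.items := by
  unfold pvStepTarget
  rw [wmin_foldl_stepEntry N t _ d.items PySem.Dict.empty (by simpa using PySem.Dict.nodup_keys_empty)]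
  rw [wmin_contribs]
  have : wmin (fun k => gRec N rest k.1 k.2) (PySem.Dict.empty : PySem.Dict (Int × Int) Int).items = ⊤ := rfl
  rw [this]
  simp

lemma nodup_foldl_stepEntry (N t : Int) (l : List ((Int × Int) × Int)) :
    ∀ (acc : PySem.Dict (Int × Int) Int), acc.keys.Nodup →
      ((l.foldl (pvStepEntry N t) acc).keys).Nodup := by
  induction l with
  | nil => intro acc h; exact h
  | cons p l ih =>
    intro acc h
    exact ih _ (wmin_stepEntry N t (fun _ => 0) acc p h).2

lemma nodup_stepTarget (N t : Int) (d : PySem.Dict (Int × Int) Int) :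
    (pvStepTarget N d t).keys.Nodup := by
  unfold pvStepTarget
  exact nodup_foldl_stepEntry N t d.items PySem.Dict.empty (by simpa using PySem.Dict.nodup_keys_empty)

lemma A_fold (N : Int) (Cs : List Int) :
    ∀ (d : PySem.Dict (Int × Int) Int), d.keys.Nodup →
      wmin (fun _ => 0) ((Cs.foldl (pvStepTarget N) d).items) =
        wmin (fun k => gRec N Cs k.1 k.2) d.items := by
  induction Cs with
  | nil =>
    intro d _
    have : (fun k : Int × Int => gRec N [] k.1 k.2) = fun _ => 0 := by
      funext k; rfl
    rw [List.foldl_nil, this]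
  | cons t rest ih =>
    intro d hnd
    rw [List.foldl_cons, ih _ (nodup_stepTarget N t d), wmin_stepTarget N t rest d hnd]

-- bridge from PySem's Python min (first extremal element) to a plain min fold
lemma min?_id_acc (xs : List Int) : ∀ (m : Int),
    PySem.List.min? (m :: xs) (fun v => v) = some (xs.foldl min m) := by
  induction xs with
  | nil => intro m; rfl
  | cons x xs ih =>
    intro m
    have h1 : PySem.List.min? (m :: x :: xs) (fun v => v)
        = PySem.List.min? (min m x :: xs) (fun v => v) := by
      simp only [PySem.List.min?, List.foldl_cons]
      congr 1
      show (if x < m then some x else some m) = some (min m x)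
      by_cases h : x < m
      · rw [if_pos h, min_eq_right (by omega)]
      · rw [if_neg h, min_eq_left (by omega)]
    rw [h1, ih, List.foldl_cons]

lemma wmin0_cons (q : (Int × Int) × Int) (rest : List ((Int × Int) × Int)) :
    wmin (fun _ => 0) (q :: rest) = (((rest.map (fun p => p.2)).foldl min q.2 : Int) : WithTop Int) := by
  have hgen : ∀ (l : List ((Int × Int) × Int)) (m : Int),
      l.foldl (fun acc p => min acc ((p.2 : Int) : WithTop Int)) ((m : Int) : WithTop Int)
        = (((l.map (fun p => p.2)).foldl min m : Int) : WithTop Int) := by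
    intro l
    induction l with
    | nil => intro m; rfl
    | cons p l ih =>
      intro m
      simp only [List.foldl_cons, List.map_cons, ← WithTop.coe_min, ih]
  have hbody : (fun (acc : WithTop Int) (p : (Int × Int) × Int) =>
      min acc ((p.2 + (0 : Int) : Int) : WithTop Int))
      = fun acc p => min acc ((p.2 : Int) : WithTop Int) := by
    funext acc p; norm_num
  simp only [wmin, hbody, List.foldl_cons]
  rw [show min ⊤ ((q.2 : Int) : WithTop Int) = ((q.2 : Int) : WithTop Int) by simp, hgen]

lemma A_value (N M : Int) (C : List Int) :
    get_min_code_entry_time N M C = gRec N C 1 1 := by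
  have hinit : ((PySem.Dict.empty : PySem.Dict (Int × Int) Int).insert (1, 1) 0).items
      = [((1, 1), 0)] := by
    simp [PySem.Dict.insert, PySem.Dict.empty]
  have hndinit : ((PySem.Dict.empty : PySem.Dict (Int × Int) Int).insert (1, 1) 0).keys.Nodup :=
    PySem.Dict.nodup_keys_insert _ _ _ (by simpa using PySem.Dict.nodup_keys_empty)
  have hA := A_fold N C ((PySem.Dict.empty : PySem.Dict (Int × Int) Int).insert (1, 1) 0) hndinit
  rw [hinit, wmin_cons] at hA
  have hrhs : wmin (fun k => gRec N C k.1 k.2) [] = ⊤ := rfl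
  rw [hrhs, min_eq_left le_top] at hA
  -- hA : wmin 0 (final items) = ↑(0 + gRec N C 1 1)
  simp only [get_min_code_entry_time]
  cases hitems : (C.foldl (pvStepTarget N) ((PySem.Dict.empty : PySem.Dict (Int × Int) Int).insert (1, 1) 0)).items with
  | nil =>
    exfalso
    rw [hitems] at hA
    have : (⊤ : WithTop Int) = (((0 : Int) + gRec N C 1 1 : Int) : WithTop Int) := hA
    exact (WithTop.coe_ne_top (a := ((0 : Int) + gRec N C 1 1 : Int))) this.symm
  | cons q rest =>
    rw [hitems, wmin0_cons] at hA
    have hval : (rest.map (fun p => p.2)).foldl min q.2 = gRec N C 1 1 := by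
      have := WithTop.coe_injective hA
      simpa using this
    have hvalues : (C.foldl (pvStepTarget N) ((PySem.Dict.empty : PySem.Dict (Int × Int) Int).insert (1, 1) 0)).values
        = q.2 :: rest.map (fun p => p.2) := by
      simp [PySem.Dict.values, hitems]
    rw [hvalues, min?_id_acc, hval]
    rfl

-- ===== B side =====

lemma costB_eq (N a b : Int) : pvCostB N a b = turn_digit_time N a b := by
  simp [pvCostB, turn_digit_time]

-- dp after the backward loop has processed indices down to i
def dpAt (N : Int) (C : List Int) (i : Nat) : List Int :=
  (List.range (i + 1)).map (fun j =>
    gRec N (C.drop i) ((1 :: C).getD i 0) ((1 :: C).getD j 0))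

lemma stepB_dpAt (N : Int) (C : List Int) (i : Nat) (hi : i < C.length) :
    pvStepB N C (1 :: C) (dpAt N C (i + 1)) (i : Int) = dpAt N C i := by
  have hr : PySem.List.pyRange 0 ((i : Int) + 1) 1 = List.map (fun k : Nat => (k : Int)) (List.range (i + 1)) := by
    rw [show ((i : Int) + 1) = ((i + 1 : Nat) : Int) by push_cast; ring]
    exact PySem.List.pyRange_zero_natCast (i + 1)
  simp only [pvStepB, hr, List.map_map]
  unfold dpAt
  apply List.map_congr_left
  intro k hk
  rw [List.mem_range] at hk
  simp only [Function.comp, costB_eq, PySem.List.pyGetD_natCast]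
  rw [PySem.List.getD_map_range _ _ _ _ (by omega), PySem.List.getD_map_range _ _ _ _ (by omega)]
  have hdrop : C.drop i = C.getD i 0 :: C.drop (i + 1) := by
    rw [List.drop_eq_getElem_cons hi]
    congr 1
    simp [List.getD, List.getElem?_eq_getElem hi]
  have hcur : (1 :: C).getD (i + 1) 0 = C.getD i 0 := by
    simp [List.getD_cons_succ]
  rw [hdrop, hcur]
  rfl

lemma B_loop (N : Int) (C : List Int) :
    ∀ (i : Nat), i ≤ C.length →
      (PySem.List.pyRange ((i : Int) - 1) (-1) (-1)).foldl (pvStepB N C (1 :: C)) (dpAt N C i) =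
        dpAt N C 0 := by
  intro i
  induction i with
  | zero =>
    intro _
    rw [show ((0 : Nat) : Int) - 1 = (-1 : Int) by norm_num,
      PySem.List.pyRange_neg_one_eq_nil (le_refl (-1)), List.foldl_nil]
  | succ i ih =>
    intro hle
    rw [show (((i + 1 : Nat)) : Int) - 1 = (i : Int) by push_cast; ring,
      PySem.List.pyRange_neg_one_cons (by omega), List.foldl_cons,
      stepB_dpAt N C i (by omega)]
    exact ih (by omega)

lemma B_value (N M : Int) (C : List Int) :
    get_min_code_entry_time_alt N M C = gRec N C 1 1 := by
  have hstart : List.replicate (C.length + 1) (0 : Int) = dpAt N C C.length := by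
    unfold dpAt
    rw [List.drop_length]
    have : (fun j : Nat => gRec N [] ((1 :: C).getD C.length 0) ((1 :: C).getD j 0))
        = fun _ : Nat => (0 : Int) := by
      funext j; rfl
    rw [this, List.map_const', List.length_range]
  simp only [get_min_code_entry_time_alt]
  rw [hstart, B_loop N C C.length (le_refl _)]
  unfold dpAt
  rfl

-- ===== VERDICT (by name: the statement is the Claim_ definition above) =====
theorem get_min_code_entry_time_spec : Claim_equal_get_min_code_entry_time := by
  intro N M C _
  show get_min_code_entry_time N M C = get_min_code_entry_time_alt N M C
  rw [A_value, B_value]
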